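-- pv_equiv track=rewrite | github.com/pypi-data/pypi-mirror-370 | packages/pyspark-transform-registry/pyspark_transform_registry-0.5.0-py3-none-any.whl/pyspark_transform_registry/static_analysis/schema_inference.py | _get_column_type
-- ===== SOURCE A (Python) =====
-- from typing import Any
--
-- def _get_column_type(column_name: str, type_info: dict[str, Any]) -> str:
--     """Get the inferred type for a column."""
--     inferred_types = type_info.get("inferred_types", {})
--
--     if column_name in inferred_types:
--         return inferred_types[column_name]["type"]
--
--     # Default fallback based on common column naming patterns
--     name_lower = column_name.lower()
--
--     if any(keyword in name_lower for keyword in ["id", "key"]):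
--         return "string"
--     elif any(keyword in name_lower for keyword in ["count", "num", "number"]):
--         return "integer"
--     elif any(
--         keyword in name_lower
--         for keyword in [
--             "amount",
--             "price",
--             "cost",
--             "value",
--             "revenue",
--             "profit",
--             "margin",
--             "total",
--             "sum",
--         ]
--     ):
--         return "double"
--     elif any(keyword in name_lower for keyword in ["date", "time"]):
--         return "timestamp"
--     elif any(keyword in name_lower for keyword in ["flag", "is_", "has_"]):
--         return "boolean"
--     else:
--         return "string"  # Safe default
-- ===== SOURCE B (Python) =====
-- _KW = {
--     "id": 0, "key": 0,
--     "count": 1, "num": 1, "number": 1,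
--     "amount": 2, "price": 2, "cost": 2, "value": 2, "revenue": 2,
--     "profit": 2, "margin": 2, "total": 2, "sum": 2,
--     "date": 3, "time": 3,
--     "flag": 4, "is_": 4, "has_": 4,
-- }
-- _TYPES = ("string", "integer", "double", "timestamp", "boolean", "string")
--
--
-- def _get_column_type(column_name, type_info):
--     """Get the inferred type for a column.
--
--     Keyword fallback done by a single left-to-right scan over the name:
--     at each position we look at which keywords start there and keep the
--     best (lowest) priority seen; the priority indexes the type table.
--     """
--     entry = type_info.get("inferred_types", {}).get(column_name)
--     if entry is not None:
--         return entry["type"]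
--     s = column_name.lower()
--     best = 5
--     for i in range(len(s) + 1):
--         suffix = s[i:]
--         for kw, prio in _KW.items():
--             if prio < best and suffix.startswith(kw):
--                 best = prio
--     return _TYPES[best]
-- ===== Notes on version B (the rewrite author's own statement) =====
-- stated objective: alternative
-- what changed: Instead of A's if/elif cascade of per-keyword substring tests, B makes one left-to-right scan over the lowered name, at each position checking which keywords start there and keeping the minimum priority from a flat keyword-to-priority dict, then indexes a type table with that priority; the dict lookup replaces the membership-test-plus-index pair.
import Mathlib
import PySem

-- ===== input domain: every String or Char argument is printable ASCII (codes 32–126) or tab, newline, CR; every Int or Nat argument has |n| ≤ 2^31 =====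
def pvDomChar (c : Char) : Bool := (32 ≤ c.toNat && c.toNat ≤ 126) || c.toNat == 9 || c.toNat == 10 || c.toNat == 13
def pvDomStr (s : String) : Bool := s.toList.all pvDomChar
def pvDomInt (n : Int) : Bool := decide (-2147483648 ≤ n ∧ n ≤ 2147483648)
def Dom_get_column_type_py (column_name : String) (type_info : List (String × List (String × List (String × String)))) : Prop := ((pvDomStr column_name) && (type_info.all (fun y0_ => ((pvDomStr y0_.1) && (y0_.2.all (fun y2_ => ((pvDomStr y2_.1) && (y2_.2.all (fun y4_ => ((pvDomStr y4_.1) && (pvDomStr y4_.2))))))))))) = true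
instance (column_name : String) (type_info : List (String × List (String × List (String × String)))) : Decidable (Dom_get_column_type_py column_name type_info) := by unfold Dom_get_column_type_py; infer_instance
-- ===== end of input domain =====

-- B replaces A's per-keyword substring cascade by a single left-to-right scan over
-- the name: at each position it records the best (lowest) priority of any keyword
-- starting there, then indexes a type table (objective: alternative decomposition).

-- ===== PORT A =====
def get_column_type_py (column_name : String) (type_info : List (String × List (String × List (String × String)))) : String :=
  let inferred_types := (PySem.Dict.mk type_info).getD "inferred_types" []
  if (PySem.Dict.mk inferred_types).contains column_name then
    -- inferred_types[column_name]["type"]; a missing "type" key raises KeyError (excluded by Pre_)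
    match (PySem.Dict.mk ((PySem.Dict.mk inferred_types).getD column_name [])).get? "type" with
    | some t => t
    | none => ""   -- unreachable under Pre_ (Python raises KeyError here)
  else
    let name_lower := PySem.Str.lower column_name
    if ["id", "key"].any (fun kw => PySem.Str.isIn kw name_lower) then "string"
    else if ["count", "num", "number"].any (fun kw => PySem.Str.isIn kw name_lower) then "integer"
    else if ["amount", "price", "cost", "value", "revenue", "profit", "margin", "total", "sum"].any (fun kw => PySem.Str.isIn kw name_lower) then "double"
    else if ["date", "time"].any (fun kw => PySem.Str.isIn kw name_lower) then "timestamp"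
    else if ["flag", "is_", "has_"].any (fun kw => PySem.Str.isIn kw name_lower) then "boolean"
    else "string"

-- ===== PORT B =====
-- the _KW dict: keyword → priority (insertion order)
def pvKW : List (List Char × Nat) :=
  [("id".toList, 0), ("key".toList, 0),
   ("count".toList, 1), ("num".toList, 1), ("number".toList, 1),
   ("amount".toList, 2), ("price".toList, 2), ("cost".toList, 2), ("value".toList, 2),
   ("revenue".toList, 2), ("profit".toList, 2), ("margin".toList, 2), ("total".toList, 2),
   ("sum".toList, 2),
   ("date".toList, 3), ("time".toList, 3),
   ("flag".toList, 4), ("is_".toList, 4), ("has_".toList, 4)]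

-- the _TYPES tuple
def pvTypes : List String := ["string", "integer", "double", "timestamp", "boolean", "string"]

-- the inner 'for kw, prio in _KW.items()' loop body over a fixed suffix
def pvInner (l : List (List Char × Nat)) (suffix : List Char) (best : Nat) : Nat :=
  l.foldl (fun b kp => if kp.2 < b && PySem.Chars.startswith suffix kp.1 then kp.2 else b) best

-- the outer 'for i in range(len(s) + 1)' loop over the list of positions
def pvOuter (s : List Char) (positions : List Int) (best : Nat) : Nat :=
  positions.foldl (fun b i => pvInner pvKW (PySem.List.slice s (some i) none) b) best

def pvScan (s : List Char) : Nat :=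
  pvOuter s (PySem.List.pyRange 0 ((s.length : Int) + 1) 1) 5

def get_column_type_py_alt (column_name : String) (type_info : List (String × List (String × List (String × String)))) : String :=
  match (PySem.Dict.mk ((PySem.Dict.mk type_info).getD "inferred_types" [])).get? column_name with
  | some entry =>
      match (PySem.Dict.mk entry).get? "type" with
      | some t => t
      | none => ""   -- unreachable under Pre_ (Python raises KeyError here)
  | none =>
      match PySem.List.pyGet? pvTypes ((pvScan (PySem.Chars.lower column_name.toList) : Nat) : Int) with
      | some t => t
      | none => ""   -- unreachable: pvScan ≤ 5 < 6 = pvTypes.length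

-- ===== PRECONDITION & SPEC =====
-- Pre_ excludes only inputs on which Python A raises KeyError: an inferred_types
-- entry for column_name whose record has no "type" key (B raises there too).
def Pre_get_column_type_py (column_name : String) (type_info : List (String × List (String × List (String × String)))) : Prop :=
  ∀ entry, (PySem.Dict.mk ((PySem.Dict.mk type_info).getD "inferred_types" [])).get? column_name = some entry →
    (PySem.Dict.mk entry).contains "type" = true
instance (column_name : String) (type_info : List (String × List (String × List (String × String)))) : Decidable (Pre_get_column_type_py column_name type_info) := by unfold Pre_get_column_type_py; infer_instance

def pvWitness_get_column_type_py : String × (List (String × List (String × List (String × String)))) :=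
  ("user_id", [("inferred_types", [("amount", [("type", "double")])])])

def Spec_get_column_type_py (column_name : String) (type_info : List (String × List (String × List (String × String)))) (out : String) : Prop := out = get_column_type_py_alt column_name type_info
instance (column_name : String) (type_info : List (String × List (String × List (String × String)))) (out : String) : Decidable (Spec_get_column_type_py column_name type_info out) := by unfold Spec_get_column_type_py; infer_instance

-- ===== CLAIM (what is proved, stated in full; the proofs are below) =====
def Claim_equal_get_column_type_py : Prop := ∀ (column_name : String) (type_info : List (String × List (String × List (String × String)))), Dom_get_column_type_py column_name type_info → Pre_get_column_type_py column_name type_info → Spec_get_column_type_py column_name type_info (get_column_type_py column_name type_info)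

-- ===== LEMMAS AND PROOFS =====

theorem pvInner_le (l : List (List Char × Nat)) (t : List Char) :
    ∀ b, pvInner l t b ≤ b := by
  induction l with
  | nil => intro b; exact le_rfl
  | cons kp rest ih =>
      intro b
      simp only [pvInner, List.foldl_cons] at *
      by_cases hc : (decide (kp.2 < b) && PySem.Chars.startswith t kp.1) = true
      · rw [if_pos hc]
        have hlt : kp.2 < b := of_decide_eq_true ((Bool.and_eq_true ..).mp hc).1
        exact le_trans (ih _) (le_of_lt hlt)
      · rw [if_neg hc]
        exact ih b
  
theorem pvInner_le_of (l : List (List Char × Nat)) (t kw : List Char) (p : Nat)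
    (hmem : (kw, p) ∈ l) (hpre : PySem.Chars.startswith t kw = true) :
    ∀ b, pvInner l t b ≤ p := by
  induction l with
  | nil => cases hmem
  | cons kp rest ih =>
      intro b
      rcases List.mem_cons.mp hmem with heq | hmem'
      · subst heq
        simp only [pvInner, List.foldl_cons, hpre, Bool.and_true]
        by_cases h : p < b
        · simp only [decide_eq_true h]
          exact pvInner_le rest t p
        · simp only [decide_eq_false h]
          exact le_trans (pvInner_le rest t b) (by omega)
      · simp only [pvInner, List.foldl_cons]
        split
        · exact ih hmem' _
        · exact ih hmem' b

theorem pvInner_cases (l : List (List Char × Nat)) (t : List Char) :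
    ∀ b, pvInner l t b = b ∨
      ∃ kp ∈ l, PySem.Chars.startswith t kp.1 = true ∧ pvInner l t b = kp.2 := by
  induction l with
  | nil => intro b; exact Or.inl rfl
  | cons kp rest ih =>
      intro b
      simp only [pvInner, List.foldl_cons]
      by_cases h : (kp.2 < b && PySem.Chars.startswith t kp.1) = true
      · rw [if_pos h]
        rcases ih kp.2 with h1 | ⟨kp', hm, hs, hv⟩
        · exact Or.inr ⟨kp, List.mem_cons_self .., (Bool.and_eq_true ..).mp h |>.2, h1⟩
        · exact Or.inr ⟨kp', List.mem_cons_of_mem _ hm, hs, hv⟩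
      · rw [if_neg h]
        rcases ih b with h1 | ⟨kp', hm, hs, hv⟩
        · exact Or.inl h1
        · exact Or.inr ⟨kp', List.mem_cons_of_mem _ hm, hs, hv⟩

theorem pvOuter_le (s : List Char) (P : List Int) : ∀ b, pvOuter s P b ≤ b := by
  induction P with
  | nil => intro b; exact le_rfl
  | cons i rest ih =>
      intro b
      simp only [pvOuter, List.foldl_cons] at *
      exact le_trans (ih _) (pvInner_le ..)

theorem pvOuter_le_of (s : List Char) (P : List Int) (i : Int) (kw : List Char) (p : Nat)
    (hiP : i ∈ P) (hmem : (kw, p) ∈ pvKW)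
    (hpre : PySem.Chars.startswith (PySem.List.slice s (some i) none) kw = true) :
    ∀ b, pvOuter s P b ≤ p := by
  induction P with
  | nil => cases hiP
  | cons j rest ih =>
      intro b
      rcases List.mem_cons.mp hiP with heq | hmem'
      · subst heq
        simp only [pvOuter, List.foldl_cons]
        exact le_trans (pvOuter_le s rest _) (pvInner_le_of _ _ _ _ hmem hpre b)
      · simp only [pvOuter, List.foldl_cons] at *
        exact ih hmem' _

theorem pvOuter_cases (s : List Char) (P : List Int) :
    ∀ b, pvOuter s P b = b ∨
      ∃ i ∈ P, ∃ kp ∈ pvKW,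
        PySem.Chars.startswith (PySem.List.slice s (some i) none) kp.1 = true ∧
        pvOuter s P b = kp.2 := by
  induction P with
  | nil => intro b; exact Or.inl rfl
  | cons i rest ih =>
      intro b
      simp only [pvOuter, List.foldl_cons] at *
      rcases ih (pvInner pvKW (PySem.List.slice s (some i) none) b) with h1 | ⟨j, hj, kp, hm, hs, hv⟩
      · rw [h1]
        rcases pvInner_cases pvKW (PySem.List.slice s (some i) none) b with h2 | ⟨kp, hm, hs, hv⟩
        · exact Or.inl h2
        · exact Or.inr ⟨i, List.mem_cons_self .., kp, hm, hs, hv⟩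
      · exact Or.inr ⟨j, List.mem_cons_of_mem _ hj, kp, hm, hs, hv⟩

theorem pvScan_le_of_isIn (s kw : List Char) (p : Nat)
    (hmem : (kw, p) ∈ pvKW) (hin : PySem.Chars.isIn kw s = true) :
    pvScan s ≤ p := by
  obtain ⟨j, hj⟩ := (PySem.Chars.exists_prefix_drop_iff_isIn kw s).mpr hin
  have hj' : kw <+: s.drop (min j s.length) := by
    rcases Nat.lt_or_ge s.length j with h | h
    · have : s.drop j = [] := List.drop_eq_nil_of_le (le_of_lt h)
      rw [this] at hj
      rw [List.prefix_nil.mp hj]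
      exact List.nil_prefix
    · rwa [min_eq_left h]
  refine pvOuter_le_of s _ ((min j s.length : Nat) : Int) kw p ?_ hmem ?_ 5
  · rw [PySem.List.mem_pyRange_one]
    constructor
    · exact Int.natCast_nonneg _
    · have : min j s.length ≤ s.length := min_le_right _ _
      omega
  · rw [PySem.List.slice_from_natCast]
    exact (PySem.Chars.startswith_iff ..).mpr hj'

theorem pvScan_cases (s : List Char) :
    pvScan s = 5 ∨ ∃ kp ∈ pvKW, PySem.Chars.isIn kp.1 s = true ∧ pvScan s = kp.2 := by
  rcases pvOuter_cases s (PySem.List.pyRange 0 ((s.length : Int) + 1) 1) 5 with h | ⟨i, hi, kp, hm, hs, hv⟩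
  · exact Or.inl h
  · refine Or.inr ⟨kp, hm, ?_, hv⟩
    have h0 : (0 : Int) ≤ i := ((PySem.List.mem_pyRange_one ..).mp hi).1
    rw [PySem.List.slice_from _ h0] at hs
    exact (PySem.Chars.exists_prefix_drop_iff_isIn ..).mp ⟨i.toNat, (PySem.Chars.startswith_iff ..).mp hs⟩

theorem pvScan_spec (s : List Char) :
    pvScan s =
      (if PySem.Chars.isIn "id".toList s = true ∨ PySem.Chars.isIn "key".toList s = true then 0
       else if PySem.Chars.isIn "count".toList s = true ∨ PySem.Chars.isIn "num".toList s = true ∨ PySem.Chars.isIn "number".toList s = true then 1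
       else if PySem.Chars.isIn "amount".toList s = true ∨ PySem.Chars.isIn "price".toList s = true ∨ PySem.Chars.isIn "cost".toList s = true ∨ PySem.Chars.isIn "value".toList s = true ∨ PySem.Chars.isIn "revenue".toList s = true ∨ PySem.Chars.isIn "profit".toList s = true ∨ PySem.Chars.isIn "margin".toList s = true ∨ PySem.Chars.isIn "total".toList s = true ∨ PySem.Chars.isIn "sum".toList s = true then 2
       else if PySem.Chars.isIn "date".toList s = true ∨ PySem.Chars.isIn "time".toList s = true then 3
       else if PySem.Chars.isIn "flag".toList s = true ∨ PySem.Chars.isIn "is_".toList s = true ∨ PySem.Chars.isIn "has_".toList s = true then 4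
       else 5) := by
  have hkw : ∀ kw p, (kw, p) ∈ pvKW → PySem.Chars.isIn kw s = true → pvScan s ≤ p :=
    fun kw p hm hin => pvScan_le_of_isIn s kw p hm hin
  split_ifs with h0 h1 h2 h3 h4
  · -- group 0
    have hle : pvScan s ≤ 0 := by
      rcases h0 with h | h
      · exact hkw _ 0 (by simp [pvKW]) h
      · exact hkw _ 0 (by simp [pvKW]) h
    omega
  · -- group 1
    have hle : pvScan s ≤ 1 := by
      rcases h1 with h | h | h
      · exact hkw _ 1 (by simp [pvKW]) h
      · exact hkw _ 1 (by simp [pvKW]) h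
      · exact hkw _ 1 (by simp [pvKW]) h
    rcases pvScan_cases s with h5 | ⟨kp, hm, hin, hv⟩
    · omega
    · simp only [pvKW, List.mem_cons, List.not_mem_nil, or_false] at hm
      rcases hm with rfl|rfl|rfl|rfl|rfl|rfl|rfl|rfl|rfl|rfl|rfl|rfl|rfl|rfl|rfl|rfl|rfl|rfl|rfl <;>
        simp_all
  · -- group 2
    have hle : pvScan s ≤ 2 := by
      rcases h2 with h | h | h | h | h | h | h | h | h <;>
        exact hkw _ 2 (by simp [pvKW]) h
    rcases pvScan_cases s with h5 | ⟨kp, hm, hin, hv⟩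
    · omega
    · simp only [pvKW, List.mem_cons, List.not_mem_nil, or_false] at hm
      rcases hm with rfl|rfl|rfl|rfl|rfl|rfl|rfl|rfl|rfl|rfl|rfl|rfl|rfl|rfl|rfl|rfl|rfl|rfl|rfl <;>
        simp_all
  · -- group 3
    have hle : pvScan s ≤ 3 := by
      rcases h3 with h | h <;> exact hkw _ 3 (by simp [pvKW]) h
    rcases pvScan_cases s with h5 | ⟨kp, hm, hin, hv⟩
    · omega
    · simp only [pvKW, List.mem_cons, List.not_mem_nil, or_false] at hm
      rcases hm with rfl|rfl|rfl|rfl|rfl|rfl|rfl|rfl|rfl|rfl|rfl|rfl|rfl|rfl|rfl|rfl|rfl|rfl|rfl <;>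
        simp_all
  · -- group 4
    have hle : pvScan s ≤ 4 := by
      rcases h4 with h | h | h <;> exact hkw _ 4 (by simp [pvKW]) h
    rcases pvScan_cases s with h5 | ⟨kp, hm, hin, hv⟩
    · omega
    · simp only [pvKW, List.mem_cons, List.not_mem_nil, or_false] at hm
      rcases hm with rfl|rfl|rfl|rfl|rfl|rfl|rfl|rfl|rfl|rfl|rfl|rfl|rfl|rfl|rfl|rfl|rfl|rfl|rfl <;>
        simp_all
  · -- no group matches
    rcases pvScan_cases s with h5 | ⟨kp, hm, hin, hv⟩
    · exact h5
    · simp only [pvKW, List.mem_cons, List.not_mem_nil, or_false] at hm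
      rcases hm with rfl|rfl|rfl|rfl|rfl|rfl|rfl|rfl|rfl|rfl|rfl|rfl|rfl|rfl|rfl|rfl|rfl|rfl|rfl <;>
        simp_all

-- ===== VERDICT (by name: the statement is the Claim_ definition above) =====
theorem get_column_type_py_spec : Claim_equal_get_column_type_py := by
  intro column_name type_info _ _
  unfold Spec_get_column_type_py get_column_type_py get_column_type_py_alt
  generalize (PySem.Dict.mk type_info).getD "inferred_types" [] = inferred
  cases hget : (PySem.Dict.mk inferred).get? column_name with
  | some entry =>
      simp only [PySem.Dict.contains_eq_isSome_get?, hget, Option.isSome_some, if_true]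
      rw [PySem.Dict.getD_eq_get?_getD, hget]
      rfl
  | none =>
      simp only [PySem.Dict.contains_eq_isSome_get?, hget, Option.isSome_none,
        Bool.false_eq_true, if_false]
      rw [pvScan_spec]
      simp only [List.any_cons, List.any_nil, Bool.or_false, PySem.Str.isIn_eq,
        PySem.Str.toList_lower, Bool.or_eq_true]
      split_ifs <;> rfl
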